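-- pv_equiv track=rewrite | github.com/kswoong1819/Python-Algorithm | practice/2020_07~09/0913/naver_2.py | solution
-- ===== SOURCE A (Python) =====
-- def solution(ball, order):
--     answer = []
--     i = 0
--     while len(ball) > 0:
--         n = order[i]
--         if ball[0] == n or ball[-1] == n:
--             ball.remove(n)
--             order.remove(n)
--             answer.append(n)
--             i = 0
--         else:
--             i += 1
--     return answer
-- ===== SOURCE B (Python) =====
-- def solution(ball, order):
--     pos = {}
--     for j, v in enumerate(order):
--         if v not in pos:
--             pos[v] = j
--     answer = []
--     lo, hi = 0, len(ball) - 1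
--     while lo <= hi:
--         if pos[ball[lo]] <= pos[ball[hi]]:
--             answer.append(ball[lo])
--             lo += 1
--         else:
--             answer.append(ball[hi])
--             hi -= 1
--     return answer
-- ===== Notes on version B (the rewrite author's own statement) =====
-- stated objective: faster
-- what changed: A repeatedly rescans `order` from the start and calls list.remove on both lists after every pick; B precomputes each value's first index in `order` once in a dict and walks `ball` with two pointers, picking the end whose order-index is smaller, with no removals or rescans.
-- outside the precondition, e.g. on solution([2, 1, 3, 1], [1, 3, 1, 2]): A returns [1, 1, 3, 2], B returns [1, 3, 1, 2]
import Mathlib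
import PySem

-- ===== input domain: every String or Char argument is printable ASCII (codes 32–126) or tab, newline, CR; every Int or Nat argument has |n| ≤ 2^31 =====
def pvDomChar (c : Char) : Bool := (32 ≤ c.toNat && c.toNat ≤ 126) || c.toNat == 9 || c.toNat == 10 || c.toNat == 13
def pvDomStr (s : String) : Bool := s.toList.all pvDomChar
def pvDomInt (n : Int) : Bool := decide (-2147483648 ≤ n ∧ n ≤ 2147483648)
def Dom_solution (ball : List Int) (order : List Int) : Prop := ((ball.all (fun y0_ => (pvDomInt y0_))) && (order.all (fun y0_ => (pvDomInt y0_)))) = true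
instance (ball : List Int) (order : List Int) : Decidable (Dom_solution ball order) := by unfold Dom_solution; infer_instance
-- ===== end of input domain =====

-- B replaces A's repeated scan-and-remove with a precomputed first-occurrence index and two
-- pointers (objective: faster). A empties the `ball`/`order` lists it is given, B does not
-- mutate its arguments; the equivalence proved here is about the RETURN value only.

-- ===== PORT A =====
-- literal transliteration of A's while-loop; state = (ball, order, i, answer).
-- Where Python raises (order[i] IndexError, remove ValueError) the port returns `answer`;
-- those inputs are excluded by Pre_solution.
def solLoopA (ball : List Int) (order : List Int) (i : Nat) (answer : List Int) : List Int :=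
  if ball.length = 0 then answer
  else
    match hn : PySem.List.pyGet? order (i : Int) with
    | none => answer  -- IndexError
    | some n =>
      if PySem.List.pyGet? ball 0 = some n ∨ PySem.List.pyGet? ball (-1) = some n then
        match hr : PySem.List.remove? ball n, PySem.List.remove? order n with
        | some ball', some order' => solLoopA ball' order' 0 (answer ++ [n])
        | _, _ => answer  -- ValueError (unreachable under the guard)
      else solLoopA ball order (i + 1) answer
termination_by (ball.length, order.length - i)
decreasing_by
  · left
    have hmem : n ∈ ball := by
      rcases ‹PySem.List.pyGet? ball 0 = some n ∨ PySem.List.pyGet? ball (-1) = some n› with h | h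
      · exact PySem.List.mem_of_pyGet?_eq_some _ h
      · exact PySem.List.mem_of_pyGet?_eq_some _ h
    have := PySem.List.remove?_eq_some_erase _ _ hmem
    rw [this] at hr
    cases hr
    rw [List.length_erase_of_mem hmem]
    exact Nat.sub_lt (List.length_pos_of_mem hmem) Nat.one_pos
  · right
    have hir : PySem.Raise.InRange order.length (i : Int) := by
      by_contra hno
      have hnone : PySem.List.pyGet? order (i : Int) = none := by
        rw [PySem.List.pyGet?_eq_none_iff]
        exact hno
      rw [hnone] at hn
      exact Option.some_ne_none n hn.symm
    have hlt : i < order.length := by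
      unfold PySem.Raise.InRange at hir
      exact_mod_cast hir.2
    exact Nat.sub_lt_sub_left hlt (Nat.lt_succ_self i)

def solution (ball : List Int) (order : List Int) : List Int :=
  solLoopA ball order 0 []

-- ===== PORT B =====
-- pos = {} ; for j, v in enumerate(order): if v not in pos: pos[v] = j
def buildPos (order : List Int) : PySem.Dict Int Int :=
  (PySem.List.enumerate order).foldl
    (fun d jv => if d.contains jv.2 then d else d.insert jv.2 jv.1) PySem.Dict.empty

-- the two-pointer while-loop of Source B; Python raises (KeyError) only outside Pre_solution,
-- where the port returns `answer`.
def twoPtrB (ball : List Int) (pos : PySem.Dict Int Int) (lo hi : Int) (answer : List Int) :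
    List Int :=
  if h : lo ≤ hi then
    match PySem.List.pyGet? ball lo, PySem.List.pyGet? ball hi with
    | some x, some y =>
      match pos.get? x, pos.get? y with
      | some ix, some iy =>
        if ix ≤ iy then twoPtrB ball pos (lo + 1) hi (answer ++ [x])
        else twoPtrB ball pos lo (hi - 1) (answer ++ [y])
      | _, _ => answer  -- KeyError
    | _, _ => answer  -- IndexError (unreachable for 0 ≤ lo ≤ hi < len)
  else answer
termination_by (hi + 1 - lo).toNat
decreasing_by
  · exact (Int.toNat_lt_toNat (Int.sub_pos.mpr (Int.lt_add_one_iff.mpr h))).mpr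
      (sub_lt_sub_left (lt_add_one lo) (hi + 1))
  · rw [sub_add_cancel]
    exact (Int.toNat_lt_toNat (Int.sub_pos.mpr (Int.lt_add_one_iff.mpr h))).mpr
      (sub_lt_sub_right (lt_add_one hi) lo)

def solution_alt (ball : List Int) (order : List Int) : List Int :=
  twoPtrB ball (buildPos order) 0 (ball.length - 1) []

-- ===== PRECONDITION & SPEC =====
-- Pre_ excludes (a) inputs where some ball value never occurs in order — A loops past the end
-- of order and raises IndexError (B raises KeyError) — and (b) ball lists with duplicate
-- values, a corner the ball-taking task leaves unspecified: there A's list.remove may take a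
-- matching duplicate from the MIDDLE of ball while B always takes an end.
def Pre_solution (ball : List Int) (order : List Int) : Prop :=
  ball.Nodup ∧ ∀ b ∈ ball, b ∈ order
instance (ball : List Int) (order : List Int) : Decidable (Pre_solution ball order) := by
  unfold Pre_solution; infer_instance

def pvWitness_solution : List Int × List Int := ([1, 2, 3], [2, 3, 1])

def Spec_solution (ball : List Int) (order : List Int) (out : List Int) : Prop :=
  out = solution_alt ball order
instance (ball : List Int) (order : List Int) (out : List Int) :
    Decidable (Spec_solution ball order out) := by unfold Spec_solution; infer_instance

-- ===== CLAIM (what is proved, stated in full; the proofs are below) =====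
def Claim_equal_solution : Prop := ∀ (ball : List Int) (order : List Int),
  Dom_solution ball order → Pre_solution ball order →
  Spec_solution ball order (solution ball order)

-- ===== LEMMAS AND PROOFS =====

-- mid-level spec: take the end of `b` whose value occurs first in the fixed list `ord`
def greedy (b : List Int) (ord : List Int) : List Int :=
  if hb : b = [] then []
  else if ord.idxOf (b.head hb) ≤ ord.idxOf (b.getLast hb)
       then b.head hb :: greedy b.tail ord
       else b.getLast hb :: greedy b.dropLast ord
termination_by b.length
decreasing_by
  · rw [List.length_tail]
    exact Nat.sub_lt (List.length_pos_of_ne_nil hb) Nat.one_pos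
  · rw [List.length_dropLast]
    exact Nat.sub_lt (List.length_pos_of_ne_nil hb) Nat.one_pos

theorem greedy_nil (ord : List Int) : greedy [] ord = [] := by
  rw [greedy, dif_pos rfl]

-- find? over a list with one non-matching element erased is unchanged
theorem find?_erase_of_not {α : Type} [DecidableEq α] (l : List α) (n : α) (p : α → Bool)
    (hp : p n = false) : (l.erase n).find? p = l.find? p := by
  induction l with
  | nil => simp
  | cons h t ih =>
    by_cases hhn : h = n
    · subst hhn; simp [List.erase_cons_head, List.find?, hp]
    · rw [List.erase_cons_tail (by simp [hhn])]
      simp only [List.find?]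
      cases hph : p h
      · simpa using ih
      · simp [hph]

theorem beq_false_of_ne' {a b : Int} (h : a ≠ b) : (a == b) = false := by
  simpa using h

theorem buildPos_aux (ord : List Int) :
    ∀ (s : Int) (d : PySem.Dict Int Int) (v : Int),
    ((PySem.List.enumerate ord s).foldl
        (fun d jv => if d.contains jv.2 then d else d.insert jv.2 jv.1) d).get? v
      = (match d.get? v with
         | some w => some w
         | none => if v ∈ ord then some (s + (ord.idxOf v : Int)) else none) := by
  induction ord with
  | nil =>
    intro s d v
    simp only [PySem.List.enumerate_nil, List.foldl_nil, List.not_mem_nil, if_false]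
    cases d.get? v <;> rfl
  | cons x t ih =>
    intro s d v
    rw [PySem.List.enumerate_cons]
    simp only [List.foldl_cons]
    by_cases hc : d.contains x = true
    · rw [if_pos hc]
      rw [ih]
      by_cases hvx : v = x
      · subst hvx
        have : ∃ w, d.get? v = some w := by
          cases hg : d.get? v
          · rw [PySem.Dict.get?_eq_none_iff_contains] at hg
            rw [hg] at hc; cases hc
          · exact ⟨_, rfl⟩
        obtain ⟨w, hw⟩ := this
        rw [hw]
      · cases hg : d.get? v
        · simp only [List.mem_cons, hvx, false_or]
          by_cases hvt : v ∈ t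
          · simp only [hvt, if_true]
            rw [List.idxOf_cons, beq_false_of_ne' (fun h => hvx h.symm)]
            simp only [cond_false]
            congr 1
            push_cast
            ring
          · simp [hvt]
        · rfl
    · rw [if_neg hc]
      rw [ih]
      by_cases hvx : v = x
      · subst hvx
        rw [PySem.Dict.get?_insert_self]
        have hg : d.get? v = none := by
          rw [PySem.Dict.get?_eq_none_iff_contains]
          simpa using hc
        rw [hg]
        simp [List.idxOf_cons]
      · rw [PySem.Dict.get?_insert_of_ne (hne := hvx)]
        cases hg : d.get? v
        · simp only [List.mem_cons, hvx, false_or]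
          by_cases hvt : v ∈ t
          · simp only [hvt, if_true]
            rw [List.idxOf_cons, beq_false_of_ne' (fun h => hvx h.symm)]
            simp only [cond_false]
            congr 1
            push_cast
            ring
          · simp [hvt]
        · rfl

theorem pos_get? (order : List Int) (v : Int) :
    (buildPos order).get? v = if v ∈ order then some (order.idxOf v : Int) else none := by
  unfold buildPos
  rw [buildPos_aux]
  rw [PySem.Dict.get?_empty]
  by_cases h : v ∈ order <;> simp [h]

-- the first element of `l` lying in {a, z}, as a function of idxOf
theorem find?_pair (l : List Int) (a z : Int) (ha : a ∈ l) (hz : z ∈ l) :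
    l.find? (fun v => v == a || v == z)
      = some (if l.idxOf a ≤ l.idxOf z then a else z) := by
  induction l with
  | nil => cases ha
  | cons x t ih =>
    by_cases hxa : x = a
    · subst hxa
      rw [List.find?_cons_of_pos (by simp)]
      simp [List.idxOf_cons]
    · have hat : a ∈ t := by
        rcases List.mem_cons.mp ha with h | h
        · exact absurd h.symm hxa
        · exact h
      by_cases hxz : x = z
      · subst hxz
        rw [List.find?_cons_of_pos (by simp)]
        rw [List.idxOf_cons, List.idxOf_cons, beq_false_of_ne' hxa, beq_self_eq_true]
        simp
      · have hzt : z ∈ t := by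
          rcases List.mem_cons.mp hz with h | h
          · exact absurd h.symm hxz
          · exact h
        rw [List.find?_cons_of_neg (by simp [hxa, hxz])]
        rw [ih hat hzt]
        rw [List.idxOf_cons, List.idxOf_cons, beq_false_of_ne' hxa, beq_false_of_ne' hxz]
        simp only [cond_false]
        by_cases hle : t.idxOf a ≤ t.idxOf z
        · rw [if_pos hle, if_pos (by omega)]
        · rw [if_neg hle, if_neg (by omega)]

-- if no match occurs before position i and l[i] matches, the first match is l[i]
theorem find?_of_prefix_false (p : Int → Bool) :
    ∀ (l : List Int) (i : Nat) (n : Int), l[i]? = some n → p n = true →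
    (∀ x ∈ l.take i, p x = false) → l.find? p = some n := by
  intro l
  induction l with
  | nil => intro i n h; simp at h
  | cons x t ih =>
    intro i n hget hp hpre
    cases i with
    | zero =>
      simp at hget
      subst hget
      simp [List.find?, hp]
    | succ j =>
      have hx : p x = false := hpre x (by simp [List.take_succ_cons])
      simp only [List.find?, hx]
      exact ih j n (by simpa using hget) hp
        (fun y hy => hpre y (by simp [List.take_succ_cons, hy]))

-- in a nodup list the head equals the last only for singletons
-- erasing the last element of a nodup list is dropLast
theorem erase_getLast_of_nodup (l : List Int) (hne : l ≠ []) (hnd : l.Nodup) :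
    l.erase (l.getLast hne) = l.dropLast := by
  obtain ⟨ys, z, rfl⟩ := (List.eq_nil_or_concat l).resolve_left hne
  simp only [List.concat_eq_append] at hne hnd ⊢
  rw [List.getLast_append_singleton]
  have hz : z ∉ ys := by
    intro hmem
    exact (List.disjoint_of_nodup_append hnd) hmem (by simp)
  rw [List.erase_append_right _ hz]
  simp

-- unfolding lemma for greedy on a nonempty list
theorem greedy_cons (b : List Int) (ord : List Int) (hne : b ≠ []) :
    greedy b ord =
      if ord.idxOf (b.head hne) ≤ ord.idxOf (b.getLast hne)
      then b.head hne :: greedy b.tail ord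
      else b.getLast hne :: greedy b.dropLast ord := by
  rw [greedy, dif_neg hne]

-- find? of a single-value test
theorem find?_beq_self (l : List Int) (a : Int) (h : a ∈ l) :
    l.find? (fun v => v == a) = some a := by
  induction l with
  | nil => cases h
  | cons x t ih =>
    by_cases hxa : x = a
    · subst hxa; rw [List.find?_cons_of_pos (by simp)]
    · rw [List.find?_cons_of_neg (by simp [hxa])]
      apply ih
      rcases List.mem_cons.mp h with h' | h'
      · exact absurd h'.symm hxa
      · exact h'

-- reduction lemmas for solLoopA
theorem solLoopA_zero {ball order : List Int} {i : Nat} {ans : List Int}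
    (h : ball.length = 0) : solLoopA ball order i ans = ans := by
  rw [solLoopA, if_pos h]

theorem solLoopA_step {ball order : List Int} {i : Nat} {ans : List Int} {n : Int}
    {ball' order' : List Int}
    (h : ¬ ball.length = 0) (hn : PySem.List.pyGet? order (i : Int) = some n)
    (hg : PySem.List.pyGet? ball 0 = some n ∨ PySem.List.pyGet? ball (-1) = some n)
    (hr1 : PySem.List.remove? ball n = some ball')
    (hr2 : PySem.List.remove? order n = some order') :
    solLoopA ball order i ans = solLoopA ball' order' 0 (ans ++ [n]) := by
  rw [solLoopA, if_neg h]
  split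
  · rename_i heq; rw [hn] at heq; cases heq
  · rename_i m heq
    rw [hn] at heq
    injection heq with heq'
    subst heq'
    rw [if_pos hg]
    split
    · rename_i b' o' hb' ho'
      rw [hr1] at hb'; injection hb' with hb'
      rw [hr2] at ho'; injection ho' with ho'
      rw [hb', ho']
    · rename_i hcontra
      exact (hcontra ball' order' hr1 hr2).elim

theorem solLoopA_skip {ball order : List Int} {i : Nat} {ans : List Int} {n : Int}
    (h : ¬ ball.length = 0) (hn : PySem.List.pyGet? order (i : Int) = some n)
    (hg : ¬ (PySem.List.pyGet? ball 0 = some n ∨ PySem.List.pyGet? ball (-1) = some n)) :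
    solLoopA ball order i ans = solLoopA ball order (i + 1) ans := by
  rw [solLoopA, if_neg h]
  split
  · rename_i heq; rw [hn] at heq; cases heq
  · rename_i m heq
    rw [hn] at heq
    injection heq with heq'
    subst heq'
    rw [if_neg hg]

-- pyGet? at the two ends, as head/getLast
theorem pyGet?_zero_head {l : List Int} (h : l ≠ []) :
    PySem.List.pyGet? l 0 = some (l.head h) := by
  rw [PySem.List.pyGet?_zero, ← List.head?_eq_getElem?]
  exact List.head?_eq_head h

theorem pyGet?_neg_one_getLast {l : List Int} (h : l ≠ []) :
    PySem.List.pyGet? l (-1) = some (l.getLast h) := by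
  rw [PySem.List.pyGet?_neg_one, List.getLast?_eq_getLast h]

-- A's loop computes greedy, under the invariant linking the current order to the original
theorem solLoopA_eq (order : List Int) :
    ∀ bcur ocur (i : Nat) ans,
    bcur.Nodup →
    (∀ x ∈ bcur, x ∈ ocur) →
    (∀ p : Int → Bool, (∀ v, p v = true → v ∈ bcur) → ocur.find? p = order.find? p) →
    (∀ x ∈ ocur.take i, bcur.head? ≠ some x ∧ bcur.getLast? ≠ some x) →
    solLoopA bcur ocur i ans = ans ++ greedy bcur order := by
  intro bcur ocur i ans
  induction bcur, ocur, i, ans using solLoopA.induct with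
  | case1 bcur ocur i ans h1 =>
    intro _ _ _ _
    have hb : bcur = [] := List.length_eq_zero_iff.mp h1
    subst hb
    rw [solLoopA_zero rfl]
    simp [greedy]
  | case2 bcur ocur i ans h1 hn =>
    intro _ hsub _ hpre
    exfalso
    have hb : bcur ≠ [] := fun e => h1 (by simp [e])
    have hilen : (ocur.length : Int) ≤ (i : Int) := by
      by_contra hlt
      have hir : PySem.Raise.InRange ocur.length (i : Int) := by
        unfold PySem.Raise.InRange; omega
      have hne : ¬ (PySem.List.pyGet? ocur (i : Int) = none) := by
        rw [PySem.List.pyGet?_eq_none_iff]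
        exact fun hc => hc hir
      exact hne hn
    have htake : ocur.take i = ocur := List.take_of_length_le (by exact_mod_cast hilen)
    have hmem : bcur.head hb ∈ ocur := hsub _ (List.head_mem hb)
    have := (hpre (bcur.head hb) (by rw [htake]; exact hmem)).1
    exact this (List.head?_eq_head hb)
  | case3 bcur ocur i ans h1 n hn hg ball' order' hr1 hr2 ih =>
    intro hnd hsub hinv hpre
    have hb : bcur ≠ [] := fun e => h1 (by simp [e])
    rw [solLoopA_step h1 hn hg hr1 hr2]
    obtain ⟨x, xs, rfl⟩ : ∃ x xs, bcur = x :: xs := by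
      cases bcur with
      | nil => exact absurd rfl hb
      | cons x xs => exact ⟨x, xs, rfl⟩
    obtain ⟨z, hz_def⟩ : ∃ z, (x :: xs).getLast hb = z := ⟨_, rfl⟩
    have hnaz : n = x ∨ n = z := by
      rcases hg with h | h
      · rw [pyGet?_zero_head hb] at h
        exact Or.inl (Option.some.inj h).symm
      · rw [pyGet?_neg_one_getLast hb, hz_def] at h
        exact Or.inr (Option.some.inj h).symm
    have hxmem : x ∈ x :: xs := by simp
    have hzmem : z ∈ x :: xs := hz_def ▸ List.getLast_mem hb
    have hnmem : n ∈ x :: xs := by rcases hnaz with rfl | rfl <;> assumption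
    have hsup : ∀ v : Int, (v == x || v == z) = true → v ∈ x :: xs := by
      intro v hv
      rcases Bool.or_eq_true_iff.mp hv with h | h
      · rw [eq_of_beq h]; exact hxmem
      · rw [eq_of_beq h]; exact hzmem
    have hfind_ocur : ocur.find? (fun v => v == x || v == z) = some n := by
      apply find?_of_prefix_false _ ocur i n
      · rw [← PySem.List.pyGet?_natCast]; exact hn
      · rcases hnaz with rfl | rfl <;> simp
      · intro y hy
        obtain ⟨hyh, hyl⟩ := hpre y hy
        have hya : y ≠ x := by
          intro e; subst e; exact hyh (by rw [List.head?_cons])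
        have hyz : y ≠ z := by
          intro e; subst e
          exact hyl (by rw [List.getLast?_eq_getLast hb, hz_def])
        rw [beq_false_of_ne' hya, beq_false_of_ne' hyz]
        rfl
    have hfind_order : order.find? (fun v => v == x || v == z) = some n := by
      rw [← hinv _ hsup]; exact hfind_ocur
    have hx_order : x ∈ order := by
      have h' : order.find? (fun v => v == x) = some x := by
        rw [← hinv (fun v => v == x) (fun v hv => by rw [eq_of_beq hv]; exact hxmem)]
        exact find?_beq_self ocur x (hsub x hxmem)
      exact List.mem_of_find?_eq_some h'
    have hz_order : z ∈ order := by
      have h' : order.find? (fun v => v == z) = some z := by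
        rw [← hinv (fun v => v == z) (fun v hv => by rw [eq_of_beq hv]; exact hzmem)]
        exact find?_beq_self ocur z (hsub z hzmem)
      exact List.mem_of_find?_eq_some h'
    have hn_eq : n = if order.idxOf x ≤ order.idxOf z then x else z := by
      have := find?_pair order x z hx_order hz_order
      rw [hfind_order] at this
      exact (Option.some.inj this)
    have horder' : order' = ocur.erase n := by
      have h' := PySem.List.remove?_eq_some_erase ocur n (hsub n hnmem)
      rw [h'] at hr2; injection hr2 with h''; exact h''.symm
    by_cases hxs : xs = []
    · -- singleton ball
      subst hxs
      have hzx : z = x := by rw [← hz_def]; simp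
      have hna : n = x := by
        rcases hnaz with h | h
        · exact h
        · exact h.trans hzx
      have hball' : ball' = [] := by
        have h' := PySem.List.remove?_eq_some_erase (x :: ([] : List Int)) n hnmem
        rw [h'] at hr1; injection hr1 with h''
        rw [← h'', hna, List.erase_cons_head]
      rw [solLoopA_zero (by rw [hball']; rfl)]
      have hgr : greedy [x] order = [x] := by
        rw [greedy_cons [x] order (by simp)]
        split <;> simp [greedy_nil]
      rw [hgr, hna]
    · -- at least two elements
      have hzxs : z ∈ xs := by
        rw [← hz_def, List.getLast_cons hxs]
        exact List.getLast_mem hxs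
      have hxnotin : x ∉ xs := (List.nodup_cons.mp hnd).1
      have hgreedy := greedy_cons (x :: xs) order hb
      rw [List.head_cons, hz_def, List.tail_cons] at hgreedy
      by_cases hle : order.idxOf x ≤ order.idxOf z
      · -- take the head
        have hna : n = x := by rw [hn_eq, if_pos hle]
        have hball' : ball' = xs := by
          have h' := PySem.List.remove?_eq_some_erase (x :: xs) n hnmem
          rw [h'] at hr1; injection hr1 with h''
          rw [← h'', hna, List.erase_cons_head]
        subst hball'
        subst horder'
        rw [ih]
        · rw [hgreedy, if_pos hle, hna]
          simp
        · exact (List.nodup_cons.mp hnd).2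
        · intro v hv
          have hvne : v ≠ n := by rw [hna]; intro e; subst e; exact hxnotin hv
          exact List.mem_erase_of_ne hvne |>.mpr (hsub v (List.mem_cons_of_mem _ hv))
        · intro p hp
          rw [find?_erase_of_not]
          · exact hinv p (fun v hv => List.mem_cons_of_mem _ (hp v hv))
          · by_contra hpn
            rw [Bool.not_eq_false] at hpn
            have := hp n hpn
            rw [hna] at this
            exact hxnotin this
        · simp
      · -- take the last
        have hna : n = z := by rw [hn_eq, if_neg hle]
        have hball' : ball' = (x :: xs).dropLast := by
          have h' := PySem.List.remove?_eq_some_erase (x :: xs) n hnmem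
          rw [h'] at hr1; injection hr1 with h''
          rw [← h'', hna, ← hz_def]
          exact erase_getLast_of_nodup _ _ hnd
        have hznotin : z ∉ (x :: xs).dropLast := by
          have hsplit : (x :: xs).dropLast ++ [z] = x :: xs := by
            rw [← hz_def]
            exact List.dropLast_concat_getLast _
          intro hmem
          have : ¬ (x :: xs).Nodup := by
            rw [← hsplit]
            intro hnd'
            exact (List.disjoint_of_nodup_append hnd') hmem (by simp)
          exact this hnd
        subst hball'
        subst horder'
        rw [ih]
        · rw [hgreedy, if_neg hle, hna]
          simp
        · exact List.Nodup.sublist (List.dropLast_sublist _) hnd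
        · intro v hv
          have hvne : v ≠ n := by rw [hna]; intro e; subst e; exact hznotin hv
          exact List.mem_erase_of_ne hvne |>.mpr
            (hsub v ((List.dropLast_sublist _).mem hv))
        · intro p hp
          rw [find?_erase_of_not]
          · exact hinv p (fun v hv => (List.dropLast_sublist _).mem (hp v hv))
          · by_contra hpn
            rw [Bool.not_eq_false] at hpn
            have := hp n hpn
            rw [hna] at this
            exact hznotin this
        · simp
  | case4 bcur ocur i ans h1 n hn hg hF =>
    intro hnd hsub hinv hpre
    exfalso
    have hb : bcur ≠ [] := fun e => h1 (by simp [e])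
    have hnmem : n ∈ bcur := by
      rcases hg with h | h
      · rw [pyGet?_zero_head hb] at h; injection h with h'; rw [← h']; exact List.head_mem hb
      · rw [pyGet?_neg_one_getLast hb] at h; injection h with h'; rw [← h']
        exact List.getLast_mem hb
    exact hF _ _ (PySem.List.remove?_eq_some_erase _ _ hnmem)
      (PySem.List.remove?_eq_some_erase _ _ (hsub n hnmem))
  | case5 bcur ocur i ans h1 n hn hg ih =>
    intro hnd hsub hinv hpre
    rw [solLoopA_skip h1 hn hg]
    apply ih hnd hsub hinv
    intro y hy
    have htake : ocur.take (i + 1) = ocur.take i ++ [n] := by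
      rw [List.take_succ]
      have : ocur[i]? = some n := by rw [← PySem.List.pyGet?_natCast]; exact hn
      rw [this]
      rfl
    rw [htake] at hy
    rcases List.mem_append.mp hy with h | h
    · exact hpre y h
    · have hyn : y = n := by simpa using h
      subst hyn
      constructor
      · intro e
        apply hg
        left
        cases bcur with
        | nil => exact absurd rfl h1
        | cons b bs =>
          rw [pyGet?_zero_head (l := b :: bs) (by simp)]
          rw [List.head?_cons] at e
          injection e with e'
          rw [e']
          simp
      · intro e
        apply hg
        right
        have hb : bcur ≠ [] := fun e' => h1 (by simp [e'])
        rw [pyGet?_neg_one_getLast hb]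
        rw [List.getLast?_eq_getLast hb] at e
        injection e with e'; rw [e']

-- B's loop computes greedy on the window ball[lo..hi]
theorem twoPtrB_eq (ball order : List Int) (hsub : ∀ x ∈ ball, x ∈ order) :
    ∀ (k : Nat) (lo hi : Int) ans, 0 ≤ lo → hi < ball.length → (hi + 1 - lo).toNat = k →
    twoPtrB ball (buildPos order) lo hi ans
      = ans ++ greedy ((ball.take (hi + 1).toNat).drop lo.toNat) order := by
  intro k
  induction k using Nat.strong_induction_on with
  | _ k ihk =>
    intro lo hi ans hlo hhi hk
    by_cases hlh : lo ≤ hi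
    · -- nonempty window
      have hLo : lo.toNat ≤ hi.toNat := by omega
      have hHi : hi.toNat < ball.length := by omega
      have hH1 : (hi + 1).toNat = hi.toNat + 1 := by omega
      have hlolen : lo.toNat < ball.length := by omega
      have hx : PySem.List.pyGet? ball lo = some ball[lo.toNat] :=
        PySem.List.pyGet?_eq_some_getElem ball hlo (by omega)
      have hy : PySem.List.pyGet? ball hi = some ball[hi.toNat] :=
        PySem.List.pyGet?_eq_some_getElem ball (by omega) (by omega)
      set w := (ball.take (hi + 1).toNat).drop lo.toNat with hw_def
      have hwlen : w.length = hi.toNat + 1 - lo.toNat := by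
        rw [hw_def, List.length_drop, List.length_take, hH1]
        omega
      have hwne : w ≠ [] := by
        intro e
        rw [e] at hwlen
        simp at hwlen
        omega
      have hw_get : ∀ m : Nat, m < hi.toNat + 1 - lo.toNat → w[m]? = ball[lo.toNat + m]? := by
        intro m hm
        rw [hw_def, List.getElem?_drop, List.getElem?_take_of_lt (by omega)]
      have hw_head : w.head hwne = ball[lo.toNat] := by
        have h1 : some (w.head hwne) = w[0]? :=
          (List.head?_eq_head hwne).symm.trans List.head?_eq_getElem?
        rw [hw_get 0 (by omega), Nat.add_zero, List.getElem?_eq_getElem hlolen] at h1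
        exact Option.some.inj h1
      have hw_last : w.getLast hwne = ball[hi.toNat] := by
        have h1 : some (w.getLast hwne) = w[w.length - 1]? :=
          (List.getLast?_eq_getLast hwne).symm.trans List.getLast?_eq_getElem?
        rw [hwlen, hw_get (hi.toNat + 1 - lo.toNat - 1) (by omega)] at h1
        have h3 : lo.toNat + (hi.toNat + 1 - lo.toNat - 1) = hi.toNat := by omega
        rw [h3, List.getElem?_eq_getElem hHi] at h1
        exact Option.some.inj h1
      have hxmem : ball[lo.toNat] ∈ order := hsub _ (List.getElem_mem _)
      have hymem : ball[hi.toNat] ∈ order := hsub _ (List.getElem_mem _)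
      have hgx : (buildPos order).get? ball[lo.toNat]
          = some ((order.idxOf ball[lo.toNat] : Int)) := by
        rw [pos_get?, if_pos hxmem]
      have hgy : (buildPos order).get? ball[hi.toNat]
          = some ((order.idxOf ball[hi.toNat] : Int)) := by
        rw [pos_get?, if_pos hymem]
      rw [twoPtrB, dif_pos hlh, hx, hy]
      simp only [hgx, hgy]
      show (if ((order.idxOf ball[lo.toNat] : Int)) ≤ ((order.idxOf ball[hi.toNat] : Int))
            then twoPtrB ball (buildPos order) (lo + 1) hi (ans ++ [ball[lo.toNat]])
            else twoPtrB ball (buildPos order) lo (hi - 1) (ans ++ [ball[hi.toNat]]))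
          = ans ++ greedy w order
      rw [greedy_cons w order hwne, hw_head, hw_last]
      by_cases hle : order.idxOf ball[lo.toNat] ≤ order.idxOf ball[hi.toNat]
      · rw [if_pos (by exact_mod_cast hle), if_pos hle]
        have hw_tail : w.tail = (ball.take (hi + 1).toNat).drop (lo + 1).toNat := by
          rw [hw_def, List.tail_drop]
          congr 1
          omega
        rw [ihk (hi + 1 - (lo + 1)).toNat (by omega) (lo + 1) hi (ans ++ [ball[lo.toNat]])
          (by omega) hhi rfl]
        rw [← hw_tail]
        simp
      · rw [if_neg (by exact_mod_cast hle), if_neg hle]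
        have hw_dropLast : w.dropLast = (ball.take ((hi - 1) + 1).toNat).drop lo.toNat := by
          apply List.ext_getElem?
          intro m
          rw [List.getElem?_dropLast, hwlen]
          have hH2 : ((hi - 1) + 1).toNat = hi.toNat := by omega
          rw [List.getElem?_drop, hH2]
          by_cases hm : m < hi.toNat + 1 - lo.toNat - 1
          · rw [if_pos hm, List.getElem?_drop]
            rw [List.getElem?_take_of_lt (by omega), List.getElem?_take_of_lt (by omega)]
          · rw [if_neg hm, List.getElem?_drop, List.getElem?_take, if_neg (by omega)]
        rw [ihk (hi - 1 + 1 - lo).toNat (by omega) lo (hi - 1) (ans ++ [ball[hi.toNat]])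
          (by omega) (by omega) rfl]
        rw [← hw_dropLast]
        simp
    · -- empty window
      rw [twoPtrB, dif_neg hlh]
      have hempty : (ball.take (hi + 1).toNat).drop lo.toNat = [] := by
        apply List.drop_eq_nil_of_le
        rw [List.length_take]
        omega
      rw [hempty]
      rw [greedy_nil]
      simp

-- ===== VERDICT (by name: the statement is the Claim_ definition above) =====
theorem solution_spec : Claim_equal_solution := by
  intro ball order _ hpre
  obtain ⟨hnd, hsub⟩ := hpre
  unfold Spec_solution solution solution_alt
  rw [solLoopA_eq order ball order 0 [] hnd hsub (fun _ _ => rfl) (by simp)]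
  rcases ball with _ | ⟨x, xs⟩
  · simp [twoPtrB, greedy]
  · rw [twoPtrB_eq (x :: xs) order hsub _ 0 (((x :: xs).length : Int) - 1) [] (by omega)
      (by omega) rfl]
    have h1 : ((((x :: xs).length : Int) - 1) + 1).toNat = (x :: xs).length := by
      simp
    rw [h1]
    simp [List.take_of_length_le]
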